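-- pv_equiv track=rewrite | github.com/majeeedshaikh/pocket-agent | eval/evaluate.py | extract_last_user_prompt
-- ===== SOURCE A (Python) =====
-- def extract_last_user_prompt(messages: list[dict]) -> tuple[str, list[dict]]:
--     """Split messages into (last user prompt, history)."""
--     history = []
--     prompt = ""
--     for i, msg in enumerate(messages):
--         if msg["role"] == "system":
--             continue
--         if i == len(messages) - 1 and msg["role"] == "user":
--             prompt = msg["content"]
--         else:
--             if msg["role"] in ("user", "assistant"):
--                 history.append({"role": msg["role"], "content": msg["content"]})
--     return prompt, history
-- ===== SOURCE B (Python) =====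
-- def extract_last_user_prompt(messages: list[dict]) -> tuple[str, list[dict]]:
--     """Split messages into (last user prompt, history), by structural recursion:
--     the last message is the base case of recursion on the tail, and history is
--     built back-to-front by prepending."""
--     if not messages:
--         return "", []
--     head, tail = messages[0], messages[1:]
--     if not tail:
--         if head["role"] == "user":
--             return head["content"], []
--         prompt, hist = "", []
--     else:
--         prompt, hist = extract_last_user_prompt(tail)
--     if head["role"] in ("user", "assistant"):
--         hist = [{"role": head["role"], "content": head["content"]}] + hist
--     return prompt, hist
-- ===== Notes on version B (the rewrite author's own statement) =====
-- stated objective: alternative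
-- what changed: Replaces A's single enumerate loop with per-iteration last-index check by structural recursion on the tail: the final message is the recursion's base case and the history is assembled back-to-front by prepending during the unwind.
import Mathlib
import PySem

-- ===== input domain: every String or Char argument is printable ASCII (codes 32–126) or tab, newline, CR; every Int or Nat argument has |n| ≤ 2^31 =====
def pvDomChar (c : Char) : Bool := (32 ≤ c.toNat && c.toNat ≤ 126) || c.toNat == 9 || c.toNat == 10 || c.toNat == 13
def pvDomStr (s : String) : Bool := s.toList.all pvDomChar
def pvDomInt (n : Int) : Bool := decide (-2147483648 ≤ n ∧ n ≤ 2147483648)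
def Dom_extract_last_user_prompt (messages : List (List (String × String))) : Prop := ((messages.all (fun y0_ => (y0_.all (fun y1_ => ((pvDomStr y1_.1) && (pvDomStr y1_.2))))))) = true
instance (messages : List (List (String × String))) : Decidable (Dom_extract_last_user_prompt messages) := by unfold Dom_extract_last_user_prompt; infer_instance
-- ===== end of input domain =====

-- B replaces A's enumerate loop (with its per-iteration last-index check) by structural
-- recursion on the tail: the last message is the recursion's base case and the history
-- is built back-to-front by prepending during the unwind. Objective 'alternative'.

-- shared dict-access primitive: msg[k] on an association list (first match; "" only
-- reachable outside Pre_, where the Python raises KeyError)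
def pvGet (m : List (String × String)) (k : String) : String :=
  ((m.find? (fun p => p.1 == k)).map (·.2)).getD ""
def pvHas (m : List (String × String)) (k : String) : Bool :=
  m.any (fun p => p.1 == k)

-- ===== PORT A =====
-- the for-loop over enumerate(messages), carried as index i, accumulator hist, prompt
def pvGoA (n : Nat) (i : Nat) (msgs : List (List (String × String)))
    (hist : List (List (String × String))) (prompt : String) :
    String × (List (List (String × String))) :=
  match msgs with
  | [] => (prompt, hist)
  | msg :: rest =>
    let role := pvGet msg "role"
    if role = "system" then pvGoA n (i+1) rest hist prompt
    else if i = n - 1 ∧ role = "user" then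
      pvGoA n (i+1) rest hist (pvGet msg "content")
    else if role = "user" ∨ role = "assistant" then
      pvGoA n (i+1) rest (hist ++ [[("role", role), ("content", pvGet msg "content")]]) prompt
    else pvGoA n (i+1) rest hist prompt

def extract_last_user_prompt (messages : List (List (String × String))) : String × (List (List (String × String))) :=
  pvGoA messages.length 0 messages [] ""

-- ===== PORT B =====
-- structural recursion on the tail; 'none' models Python's early return on a last user message
def extract_last_user_prompt_alt : List (List (String × String)) → String × (List (List (String × String)))
  | [] => ("", [])
  | head :: tail =>
    let r : Option (String × List (List (String × String))) :=
      match tail with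
      | [] => if pvGet head "role" = "user" then none else some ("", [])
      | _ :: _ => some (extract_last_user_prompt_alt tail)
    match r with
    | none => (pvGet head "content", [])
    | some (prompt, hist) =>
      if pvGet head "role" = "user" ∨ pvGet head "role" = "assistant" then
        (prompt, [("role", pvGet head "role"), ("content", pvGet head "content")] :: hist)
      else (prompt, hist)

-- ===== PRECONDITION & SPEC =====
-- Pre_ excludes exactly the inputs where Python A raises KeyError: a message without a
-- "role" key, or a user/assistant message without a "content" key.
def Pre_extract_last_user_prompt (messages : List (List (String × String))) : Prop :=
  (messages.all (fun m =>
    pvHas m "role" &&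
      (!(pvGet m "role" == "user" || pvGet m "role" == "assistant") || pvHas m "content"))) = true
instance (messages : List (List (String × String))) : Decidable (Pre_extract_last_user_prompt messages) := by unfold Pre_extract_last_user_prompt; infer_instance

def pvWitness_extract_last_user_prompt : (List (List (String × String))) :=
  [[("role", "system"), ("content", "s")], [("role", "user"), ("content", "hi")]]

def Spec_extract_last_user_prompt (messages : List (List (String × String))) (out : String × (List (List (String × String)))) : Prop := out = extract_last_user_prompt_alt messages
instance (messages : List (List (String × String))) (out : String × (List (List (String × String)))) : Decidable (Spec_extract_last_user_prompt messages out) := by unfold Spec_extract_last_user_prompt; infer_instance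

-- ===== CLAIM (what is proved, stated in full; the proofs are below) =====
def Claim_equal_extract_last_user_prompt : Prop := ∀ (messages : List (List (String × String))), Dom_extract_last_user_prompt messages → Pre_extract_last_user_prompt messages → Spec_extract_last_user_prompt messages (extract_last_user_prompt messages)

-- ===== LEMMAS AND PROOFS =====

-- proof-only helpers: both ports are shown to equal this closed characterization
def pvKeep (m : List (String × String)) : Bool :=
  pvGet m "role" == "user" || pvGet m "role" == "assistant"
def pvBuild (m : List (String × String)) : List (String × String) :=
  [("role", pvGet m "role"), ("content", pvGet m "content")]
def pvHist (rest : List (List (String × String))) : List (List (String × String)) :=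
  (rest.filter pvKeep).map pvBuild
def pvSpec (msgs : List (List (String × String))) (hist : List (List (String × String)))
    (prompt : String) : String × (List (List (String × String))) :=
  match msgs.getLast? with
  | some m =>
    if pvGet m "role" = "user" then
      (pvGet m "content", hist ++ pvHist msgs.dropLast)
    else (prompt, hist ++ pvHist msgs)
  | none => (prompt, hist ++ pvHist msgs)

theorem pvHist_cons (m : List (String × String)) (l : List (List (String × String))) :
    pvHist (m :: l) = (if pvKeep m then [pvBuild m] else []) ++ pvHist l := by
  by_cases h : pvKeep m = true <;> simp [pvHist, h]

theorem pvKeep_iff (m : List (String × String)) :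
    pvKeep m = true ↔ (pvGet m "role" = "user" ∨ pvGet m "role" = "assistant") := by
  simp [pvKeep]

theorem pvGoA_eq (msgs : List (List (String × String))) :
    ∀ (i n : Nat) (hist : List (List (String × String))) (prompt : String),
    i + msgs.length = n →
    pvGoA n i msgs hist prompt = pvSpec msgs hist prompt := by
  induction msgs with
  | nil => intro i n hist prompt _; simp [pvGoA, pvSpec, pvHist]
  | cons msg rest ih =>
    intro i n hist prompt hn
    match hr : rest with
    | [] =>
      have hi : i = n - 1 := by simp at hn; omega
      by_cases hs : pvGet msg "role" = "system"
      · have hk : pvKeep msg = false := by simp [pvKeep, hs]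
        simp [pvGoA, hs, hk, pvSpec, pvHist]
      · by_cases hu : pvGet msg "role" = "user"
        · simp [pvGoA, hi, hu, pvSpec, pvHist]
        · by_cases ha : pvGet msg "role" = "assistant"
          · have hk : pvKeep msg = true := by simp [pvKeep, ha]
            simp [pvGoA, ha, hk, pvSpec, pvHist, pvBuild]
          · have hk : pvKeep msg = false := by simp [pvKeep, hu, ha]
            simp [pvGoA, hs, hu, ha, hk, pvSpec, pvHist]
    | m2 :: rest2 =>
      have hne : ¬ i = n - 1 := by simp at hn; omega
      have hstep : (i + 1) + (m2 :: rest2).length = n := by simp at hn ⊢; omega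
      have hlast : (msg :: m2 :: rest2).getLast? = (m2 :: rest2).getLast? := by
        simp [List.getLast?_cons_cons]
      have hdrop : (msg :: m2 :: rest2).dropLast = msg :: (m2 :: rest2).dropLast := by
        simp
      by_cases hs : pvGet msg "role" = "system"
      · have hk : pvKeep msg = false := by simp [pvKeep, hs]
        rw [show pvGoA n i (msg :: m2 :: rest2) hist prompt
              = pvGoA n (i+1) (m2 :: rest2) hist prompt by simp [pvGoA, hs]]
        rw [ih (i+1) n hist prompt hstep]
        unfold pvSpec
        rw [hlast, hdrop]
        cases (m2 :: rest2).getLast? with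
        | none => simp [pvHist_cons, hk]
        | some m => by_cases hu : pvGet m "role" = "user" <;> simp [hu, pvHist_cons, hk]
      · by_cases hk : pvKeep msg = true
        · have hcond : pvGet msg "role" = "user" ∨ pvGet msg "role" = "assistant" :=
            (pvKeep_iff msg).mp hk
          rw [show pvGoA n i (msg :: m2 :: rest2) hist prompt
                = pvGoA n (i+1) (m2 :: rest2)
                    (hist ++ [[("role", pvGet msg "role"), ("content", pvGet msg "content")]]) prompt by
              simp [pvGoA, hs, hne, hcond]]
          rw [ih (i+1) n _ prompt hstep]
          unfold pvSpec
          rw [hlast, hdrop]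
          cases (m2 :: rest2).getLast? with
          | none => simp [pvHist_cons, hk, pvBuild, List.append_assoc]
          | some m =>
            by_cases hu : pvGet m "role" = "user" <;>
              simp [hu, pvHist_cons, hk, pvBuild, List.append_assoc]
        · have hcond : ¬ (pvGet msg "role" = "user" ∨ pvGet msg "role" = "assistant") := by
            rw [← pvKeep_iff]; simp [hk]
          rw [show pvGoA n i (msg :: m2 :: rest2) hist prompt
                = pvGoA n (i+1) (m2 :: rest2) hist prompt by
              simp [pvGoA, hs, hne, hcond]]
          rw [ih (i+1) n hist prompt hstep]
          unfold pvSpec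
          rw [hlast, hdrop]
          cases (m2 :: rest2).getLast? with
          | none => simp [pvHist_cons, hk]
          | some m => by_cases hu : pvGet m "role" = "user" <;> simp [hu, pvHist_cons, hk]

theorem pvAlt_eq (msgs : List (List (String × String))) :
    extract_last_user_prompt_alt msgs = pvSpec msgs [] "" := by
  induction msgs with
  | nil => simp [extract_last_user_prompt_alt, pvSpec, pvHist]
  | cons head tail ih =>
    match hr : tail with
    | [] =>
      by_cases hu : pvGet head "role" = "user"
      · simp [extract_last_user_prompt_alt, hu, pvSpec, pvHist]
      · by_cases ha : pvGet head "role" = "assistant"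
        · have hk : pvKeep head = true := by simp [pvKeep, ha]
          simp [extract_last_user_prompt_alt, ha, pvSpec, pvHist, hk, pvBuild]
        · have hk : pvKeep head = false := by simp [pvKeep, hu, ha]
          simp [extract_last_user_prompt_alt, hu, ha, pvSpec, pvHist, hk]
    | m2 :: rest2 =>
      have hlast : (head :: m2 :: rest2).getLast? = (m2 :: rest2).getLast? := by
        simp [List.getLast?_cons_cons]
      have hdrop : (head :: m2 :: rest2).dropLast = head :: (m2 :: rest2).dropLast := by
        simp
      rw [show extract_last_user_prompt_alt (head :: m2 :: rest2)
            = (match extract_last_user_prompt_alt (m2 :: rest2) with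
               | (prompt, hist) =>
                 if pvGet head "role" = "user" ∨ pvGet head "role" = "assistant" then
                   (prompt, [("role", pvGet head "role"), ("content", pvGet head "content")] :: hist)
                 else (prompt, hist)) by rfl]
      rw [ih]
      unfold pvSpec
      rw [hlast, hdrop]
      by_cases hk : pvKeep head = true
      · have hcond : pvGet head "role" = "user" ∨ pvGet head "role" = "assistant" :=
          (pvKeep_iff head).mp hk
        cases (m2 :: rest2).getLast? with
        | none => simp [hcond, pvHist_cons, hk, pvBuild]
        | some m =>
          by_cases hu : pvGet m "role" = "user" <;> simp [hu, hcond, pvHist_cons, hk, pvBuild]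
      · have hcond : ¬ (pvGet head "role" = "user" ∨ pvGet head "role" = "assistant") := by
          rw [← pvKeep_iff]; simp [hk]
        cases (m2 :: rest2).getLast? with
        | none => simp [hcond, pvHist_cons, hk]
        | some m => by_cases hu : pvGet m "role" = "user" <;> simp [hu, hcond, pvHist_cons, hk]

-- ===== VERDICT (by name: the statement is the Claim_ definition above) =====
theorem extract_last_user_prompt_spec : Claim_equal_extract_last_user_prompt := by
  intro messages _ _
  unfold Spec_extract_last_user_prompt extract_last_user_prompt
  rw [pvGoA_eq messages 0 messages.length [] "" (by simp), pvAlt_eq]
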